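-- pv_equiv track=rewrite | github.com/boscomonkey/learn_python | 04_pig_latin/pig_latin.py | find_longest_consonant_prefix
-- ===== SOURCE A (Python) =====
-- def find_longest_consonant_prefix(word, maxlen=3):
--     buffer = ''
--     ii = 0
--     while ii < len(word):
--         # special case phonemes
--         phoneme = word[ii:ii+2]
--         if phoneme == 'qu' or phoneme == 'Qu':
--             buffer += phoneme
--             ii += 2
--
--         # normal consonants
--         else:
--             letter = word[ii]
--             if is_vowel(letter):
--                 break
--             else:
--                 buffer += letter
--                 ii += 1
--     return buffer
--
-- def is_vowel(letter):
--     vowels = {'a', 'e', 'i', 'o', 'u', 'A', 'E', 'I', 'O', 'U'}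
--     return letter in vowels
-- ===== SOURCE B (Python) =====
-- import re
--
-- _PREFIX_RE = re.compile(r'(?:[qQ]u|[^aeiouAEIOU])*')
--
-- def find_longest_consonant_prefix(word, maxlen=3):
--     return _PREFIX_RE.match(word).group(0)
-- ===== Notes on version B (the rewrite author's own statement) =====
-- stated objective: idiomatic
-- what changed: Replaced the index-stepping while loop that builds the prefix by repeated slicing and string concatenation with a single greedy regex match of the leading (?:[qQ]u|[^aeiouAEIOU])* prefix.
import Mathlib
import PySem

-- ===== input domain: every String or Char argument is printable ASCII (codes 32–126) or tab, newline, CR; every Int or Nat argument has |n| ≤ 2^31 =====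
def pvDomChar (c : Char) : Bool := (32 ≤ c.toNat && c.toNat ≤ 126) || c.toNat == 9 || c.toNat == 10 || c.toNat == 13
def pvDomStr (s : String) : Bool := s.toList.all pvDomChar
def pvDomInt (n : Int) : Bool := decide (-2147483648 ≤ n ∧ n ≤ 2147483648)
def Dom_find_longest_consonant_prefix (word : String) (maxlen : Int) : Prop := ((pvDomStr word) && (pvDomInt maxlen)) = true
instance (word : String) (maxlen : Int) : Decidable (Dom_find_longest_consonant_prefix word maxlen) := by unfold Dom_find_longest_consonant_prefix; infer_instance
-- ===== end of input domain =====

-- B replaces A's index-stepping while loop by one greedy regex match of the leading prefix (idiomatic; same cost).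

-- ===== PORT A =====
-- is_vowel(letter): membership in the vowel set
def is_vowel (letter : Char) : Bool :=
  PySem.Set.contains (PySem.Set.ofList ['a', 'e', 'i', 'o', 'u', 'A', 'E', 'I', 'O', 'U']) letter

-- the while loop: state is (buffer, ii)
def flcpLoop (cs : List Char) (buffer : List Char) (ii : Nat) : List Char :=
  if _h : ii < cs.length then
    let phoneme := PySem.List.slice cs (some (ii : Int)) (some ((ii : Int) + 2))
    if phoneme = ['q', 'u'] ∨ phoneme = ['Q', 'u'] then
      flcpLoop cs (buffer ++ phoneme) (ii + 2)
    else
      let letter := cs[ii]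
      if is_vowel letter then buffer
      else flcpLoop cs (buffer ++ [letter]) (ii + 1)
  else buffer
termination_by cs.length - ii

def find_longest_consonant_prefix (word : String) (maxlen : Int) : String :=
  String.ofList (flcpLoop word.toList [] 0)

-- ===== PORT B =====
-- the regex (?:[qQ]u|[^aeiouAEIOU])* as a greedy matcher: at each position try the
-- '[qQ]u' alternative first, then the single non-vowel character class, else stop.
def flcpMatch (cs : List Char) : List Char :=
  match cs with
  | [] => []
  | c :: rest =>
    if (c == 'q' || c == 'Q') && rest.head? == some 'u' then
      c :: 'u' :: flcpMatch rest.tail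
    else if !(c ∈ ['a', 'e', 'i', 'o', 'u', 'A', 'E', 'I', 'O', 'U']) then
      c :: flcpMatch rest
    else []
termination_by cs.length
decreasing_by
  all_goals simp

def find_longest_consonant_prefix_alt (word : String) (maxlen : Int) : String :=
  String.ofList (flcpMatch word.toList)

-- ===== PRECONDITION & SPEC =====
def Spec_find_longest_consonant_prefix (word : String) (maxlen : Int) (out : String) : Prop := out = find_longest_consonant_prefix_alt word maxlen
instance (word : String) (maxlen : Int) (out : String) : Decidable (Spec_find_longest_consonant_prefix word maxlen out) := by unfold Spec_find_longest_consonant_prefix; infer_instance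

-- ===== CLAIM (what is proved, stated in full; the proofs are below) =====
def Claim_equal_find_longest_consonant_prefix : Prop := ∀ (word : String) (maxlen : Int), Dom_find_longest_consonant_prefix word maxlen → Spec_find_longest_consonant_prefix word maxlen (find_longest_consonant_prefix word maxlen)

-- ===== LEMMAS AND PROOFS =====
theorem is_vowel_iff (c : Char) :
    is_vowel c = true ↔ c ∈ (['a', 'e', 'i', 'o', 'u', 'A', 'E', 'I', 'O', 'U'] : List Char) := by
  simp [is_vowel, PySem.Set.contains, PySem.Set.mem_ofList]

theorem flcpMatch_nil : flcpMatch [] = [] := by rw [flcpMatch]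

theorem flcpMatch_qu (c : Char) (rest : List Char)
    (h : (c = 'q' ∨ c = 'Q') ∧ rest.head? = some 'u') :
    flcpMatch (c :: rest) = c :: 'u' :: flcpMatch rest.tail := by
  rw [flcpMatch]
  have hb : ((c == 'q' || c == 'Q') && rest.head? == some 'u') = true := by
    rcases h with ⟨h1 | h1, h2⟩ <;> simp [h1, h2]
  rw [if_pos hb]

theorem flcpMatch_vowel (c : Char) (rest : List Char)
    (h : ¬ ((c = 'q' ∨ c = 'Q') ∧ rest.head? = some 'u'))
    (hv : c ∈ (['a', 'e', 'i', 'o', 'u', 'A', 'E', 'I', 'O', 'U'] : List Char)) :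
    flcpMatch (c :: rest) = [] := by
  rw [flcpMatch]
  have hb : ¬ (((c == 'q' || c == 'Q') && rest.head? == some 'u') = true) := by
    simp only [Bool.and_eq_true, Bool.or_eq_true, beq_iff_eq]
    rintro ⟨h1, h2⟩; exact h ⟨h1, h2⟩
  rw [if_neg hb, if_neg (by simp [hv])]

theorem flcpMatch_cons (c : Char) (rest : List Char)
    (h : ¬ ((c = 'q' ∨ c = 'Q') ∧ rest.head? = some 'u'))
    (hv : c ∉ (['a', 'e', 'i', 'o', 'u', 'A', 'E', 'I', 'O', 'U'] : List Char)) :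
    flcpMatch (c :: rest) = c :: flcpMatch rest := by
  rw [flcpMatch]
  have hb : ¬ (((c == 'q' || c == 'Q') && rest.head? == some 'u') = true) := by
    simp only [Bool.and_eq_true, Bool.or_eq_true, beq_iff_eq]
    rintro ⟨h1, h2⟩; exact h ⟨h1, h2⟩
  rw [if_neg hb, if_pos (by simp [hv])]

theorem flcpLoop_eq (cs : List Char) (buffer : List Char) (ii : Nat) :
    flcpLoop cs buffer ii = buffer ++ flcpMatch (cs.drop ii) := by
  have key : ∀ n cs ii buffer, cs.length - ii ≤ n →
      flcpLoop cs buffer ii = buffer ++ flcpMatch (List.drop ii cs) := by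
    intro n
    induction n with
    | zero =>
      intro cs ii buffer h
      have hge : ¬ ii < cs.length := by omega
      have hnil : List.drop ii cs = [] := List.drop_eq_nil_of_le (by omega)
      rw [flcpLoop]
      simp [hge, hnil, flcpMatch_nil]
    | succ n ih =>
      intro cs ii buffer h
      rw [flcpLoop]
      by_cases hlt : ii < cs.length
      · simp only [hlt, dif_pos]
        have hslice : PySem.List.slice cs (some (ii : Int)) (some ((ii : Int) + 2)) =
            (List.drop ii cs).take 2 := by exact_mod_cast PySem.List.slice_natCast_add cs ii 2
        have hdrop : List.drop ii cs = cs[ii] :: List.drop (ii + 1) cs :=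
          List.drop_eq_getElem_cons hlt
        rcases hrest : List.drop (ii + 1) cs with _ | ⟨c2, rest2⟩
        · -- exactly one character left
          have hph : (List.drop ii cs).take 2 = [cs[ii]] := by rw [hdrop, hrest]; rfl
          have hnq : ¬ ([cs[ii]] = ['q', 'u'] ∨ [cs[ii]] = ['Q', 'u']) := by simp
          have hnqu : ¬ ((cs[ii] = 'q' ∨ cs[ii] = 'Q') ∧ ([] : List Char).head? = some 'u') := by
            simp
          simp only [hslice, hph, hnq, if_false]
          by_cases hv : is_vowel cs[ii]
          · rw [if_pos hv, hdrop, hrest, flcpMatch_vowel _ _ hnqu ((is_vowel_iff _).mp hv)]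
            simp
          · rw [if_neg hv, ih cs (ii + 1) _ (by omega), hdrop, hrest,
                flcpMatch_cons _ _ hnqu (fun hc => hv ((is_vowel_iff _).mpr hc)),
                flcpMatch_nil]
            simp
        · -- at least two characters left
          have hph : (List.drop ii cs).take 2 = [cs[ii], c2] := by rw [hdrop, hrest]; rfl
          have hdrop2 : List.drop (ii + 2) cs = rest2 := by
            have h1 : List.drop 1 (List.drop (ii + 1) cs) = rest2 := by rw [hrest]; rfl
            rw [List.drop_drop] at h1
            exact h1
          simp only [hslice, hph]
          by_cases hqu : [cs[ii], c2] = ['q', 'u'] ∨ [cs[ii], c2] = ['Q', 'u']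
          · have hc : (cs[ii] = 'q' ∨ cs[ii] = 'Q') ∧ c2 = 'u' := by
              rcases hqu with h' | h' <;> simp_all
            rw [if_pos hqu, ih cs (ii + 2) _ (by omega), hdrop2, hdrop, hrest,
                flcpMatch_qu _ _ ⟨hc.1, by simp [hc.2]⟩]
            rcases hqu with h' | h' <;> simp [h', hc.2]
          · have hnqu : ¬ ((cs[ii] = 'q' ∨ cs[ii] = 'Q') ∧ (c2 :: rest2).head? = some 'u') := by
              rintro ⟨h1, h2⟩
              simp only [List.head?_cons, Option.some.injEq] at h2
              apply hqu
              rcases h1 with h' | h' <;> simp [h', h2]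
            rw [if_neg hqu]
            by_cases hv : is_vowel cs[ii]
            · rw [if_pos hv, hdrop, hrest, flcpMatch_vowel _ _ hnqu ((is_vowel_iff _).mp hv)]
              simp
            · rw [if_neg hv, ih cs (ii + 1) _ (by omega), hdrop, hrest,
                  flcpMatch_cons _ _ hnqu (fun hc => hv ((is_vowel_iff _).mpr hc))]
              simp
      · have hnil : List.drop ii cs = [] := List.drop_eq_nil_of_le (by omega)
        simp [hlt, hnil, flcpMatch_nil]
  exact key (cs.length - ii) cs ii buffer le_rfl

-- ===== VERDICT (by name: the statement is the Claim_ definition above) =====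
theorem find_longest_consonant_prefix_spec : Claim_equal_find_longest_consonant_prefix := by
  intro word maxlen _
  unfold Spec_find_longest_consonant_prefix find_longest_consonant_prefix find_longest_consonant_prefix_alt
  rw [flcpLoop_eq]
  simp
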